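-- pv_equiv track=rewrite | github.com/mattklepp/k4 | synthesis_solver.py | get_region_for_position
-- ===== SOURCE A (Python) =====
-- from typing import Dict, List, Tuple, Optional, Set
--
-- def get_region_for_position(pos: int) -> Optional[str]:
--     """Determine which clue region a position belongs to"""
--     # Define region boundaries (0-based positions)
--     regions = {
--         'EAST': (20, 23),      # positions 21-24 (1-based)
--         'NORTHEAST': (25, 33), # positions 26-34 (1-based)
--         'BERLIN': (63, 68),    # positions 64-69 (1-based)
--         'CLOCK': (69, 73)      # positions 70-74 (1-based)
--     }
--
--     for region_name, (start, end) in regions.items():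
--         if start <= pos <= end:
--             return region_name
--
--     return None
-- ===== SOURCE B (Python) =====
-- from typing import Dict, List, Tuple, Optional, Set
--
-- # Lookup table built once: every covered position -> its region name.
-- _REGIONS = {
--     'EAST': (20, 23),
--     'NORTHEAST': (25, 33),
--     'BERLIN': (63, 68),
--     'CLOCK': (69, 73),
-- }
-- _TABLE = {}
-- for _name, (_start, _end) in _REGIONS.items():
--     for _p in range(_start, _end + 1):
--         _TABLE[_p] = _name
--
--
-- def get_region_for_position(pos: int) -> Optional[str]:
--     """Determine which clue region a position belongs to"""
--     return _TABLE.get(pos)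
-- ===== Notes on version B (the rewrite author's own statement) =====
-- stated objective: idiomatic
-- what changed: Replaces the per-call scan over interval bounds with a position->name dict built once from the region ranges; the function body is a single hash lookup with .get's None default.
import Mathlib
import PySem

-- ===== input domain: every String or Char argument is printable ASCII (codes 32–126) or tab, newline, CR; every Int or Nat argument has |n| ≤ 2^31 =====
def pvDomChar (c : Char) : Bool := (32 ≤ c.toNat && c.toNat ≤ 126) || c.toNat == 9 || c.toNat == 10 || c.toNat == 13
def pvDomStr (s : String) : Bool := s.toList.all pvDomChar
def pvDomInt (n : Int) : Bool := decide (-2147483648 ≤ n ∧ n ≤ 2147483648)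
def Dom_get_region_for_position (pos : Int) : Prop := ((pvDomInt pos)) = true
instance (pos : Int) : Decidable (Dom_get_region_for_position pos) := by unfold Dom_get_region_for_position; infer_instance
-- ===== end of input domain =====

-- B builds a position->name dict once from the region ranges and answers by a single lookup (idiomatic index instead of a per-call interval scan).


-- ===== PORT A =====
-- regions dict as in A (insertion order preserved)
def pvRegionsA : PySem.Dict String (Int × Int) :=
  PySem.Dict.ofList [("EAST", (20, 23)), ("NORTHEAST", (25, 33)), ("BERLIN", (63, 68)), ("CLOCK", (69, 73))]

-- the for-loop with early return over regions.items()
def pvLoopA (pos : Int) : List (String × Int × Int) → Option String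
  | [] => none
  | (name, s, e) :: rest => if s ≤ pos ∧ pos ≤ e then some name else pvLoopA pos rest

def get_region_for_position (pos : Int) : Option String :=
  pvLoopA pos pvRegionsA.items

-- ===== PORT B =====
def pvRegionsB : PySem.Dict String (Int × Int) :=
  PySem.Dict.ofList [("EAST", (20, 23)), ("NORTHEAST", (25, 33)), ("BERLIN", (63, 68)), ("CLOCK", (69, 73))]

-- the one-time table build: for name,(s,e) in regions.items(): for p in range(s, e+1): table[p] = name
def pvTable : PySem.Dict Int String :=
  pvRegionsB.items.foldl
    (fun d r => (PySem.List.pyRange r.2.1 (r.2.2 + 1) 1).foldl (fun d p => d.insert p r.1) d)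
    PySem.Dict.empty

def get_region_for_position_alt (pos : Int) : Option String :=
  pvTable.get? pos

-- ===== PRECONDITION & SPEC =====
def Spec_get_region_for_position (pos : Int) (out : Option String) : Prop := out = get_region_for_position_alt pos
instance (pos : Int) (out : Option String) : Decidable (Spec_get_region_for_position pos out) := by unfold Spec_get_region_for_position; infer_instance

-- ===== CLAIM (what is proved, stated in full; the proofs are below) =====
def Claim_equal_get_region_for_position : Prop := ∀ (pos : Int), Dom_get_region_for_position pos → Spec_get_region_for_position pos (get_region_for_position pos)

-- ===== LEMMAS AND PROOFS =====
-- the table B builds, as a literal association list (proof-only helper)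
def pvLit : List (Int × String) := [(20, "EAST"), (21, "EAST"), (22, "EAST"), (23, "EAST"), (25, "NORTHEAST"), (26, "NORTHEAST"), (27, "NORTHEAST"), (28, "NORTHEAST"), (29, "NORTHEAST"), (30, "NORTHEAST"), (31, "NORTHEAST"), (32, "NORTHEAST"), (33, "NORTHEAST"), (63, "BERLIN"), (64, "BERLIN"), (65, "BERLIN"), (66, "BERLIN"), (67, "BERLIN"), (68, "BERLIN"), (69, "CLOCK"), (70, "CLOCK"), (71, "CLOCK"), (72, "CLOCK"), (73, "CLOCK")]

theorem pv_htab : pvTable = PySem.Dict.mk pvLit := rfl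

theorem pv_alt_eq (pos : Int) : get_region_for_position_alt pos = (PySem.Dict.mk pvLit).get? pos := by
  rw [get_region_for_position_alt, pv_htab]

theorem pv_items : pvRegionsA.items = [("EAST", (20, 23)), ("NORTHEAST", (25, 33)), ("BERLIN", (63, 68)), ("CLOCK", (69, 73))] := rfl

-- in-range positions: one finite check over all 56 of them
theorem pv_all : ∀ pos ∈ PySem.List.pyRange 19 75 1,
    pvLoopA pos [("EAST", (20, 23)), ("NORTHEAST", (25, 33)), ("BERLIN", (63, 68)), ("CLOCK", (69, 73))] =
      (PySem.Dict.mk pvLit).get? pos := by decide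

-- out of range: A's scan falls through
theorem pvA_none (pos : Int) (h : pos < 19 ∨ 74 < pos) :
    get_region_for_position pos = none := by
  simp only [get_region_for_position, pv_items, pvLoopA]
  split_ifs <;> first | rfl | omega

-- out of range: the table has no such key
theorem pvB_none (pos : Int) (h : pos < 19 ∨ 74 < pos) :
    get_region_for_position_alt pos = none := by
  rw [pv_alt_eq, PySem.Dict.get?_eq_none_iff_not_mem_keys]
  intro hmem
  simp only [pvLit, PySem.Dict.keys_mk, List.map, List.mem_cons, List.not_mem_nil, or_false] at hmem
  omega

-- ===== VERDICT (by name: the statement is the Claim_ definition above) =====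
theorem get_region_for_position_spec : Claim_equal_get_region_for_position := by
  intro pos _
  unfold Spec_get_region_for_position
  by_cases h : 19 ≤ pos ∧ pos < 75
  · have hm : pos ∈ PySem.List.pyRange 19 75 1 := (PySem.List.mem_pyRange_one).mpr ⟨h.1, h.2⟩
    rw [get_region_for_position, pv_items, pv_alt_eq]
    exact pv_all pos hm
  · rw [pvA_none pos (by omega), pvB_none pos (by omega)]
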